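-- pv_equiv track=rewrite | github.com/Fischherboot/M-ASSISTANT | sophie/sophie.py | _fuzzy_correct_word
-- ===== SOURCE A (Python) =====
-- def _levenshtein(a: str, b: str) -> int:
--     """Schnelle Levenshtein-Distanz (keine externe Abhängigkeit)."""
--     if a == b: return 0
--     if not a: return len(b)
--     if not b: return len(a)
--     la, lb = len(a), len(b)
--     prev = list(range(lb + 1))
--     for i, ca in enumerate(a):
--         curr = [i + 1] + [0] * lb
--         for j, cb in enumerate(b):
--             curr[j+1] = min(prev[j+1]+1, curr[j]+1,
--                             prev[j] + (0 if ca == cb else 1))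
--         prev = curr
--     return prev[lb]
--
-- _FUZZY_KEYWORDS: dict[str, str] = {
--     # Kanonisch → erlaubte Schreibweisen automatisch per Distanz
--     "notiz":       "notiz",
--     "notizen":     "notizen",
--     "timer":       "timer",
--     "kalender":    "kalender",
--     "termin":      "termin",
--     "erinnerung":  "erinnerung",
--     "erinnerungen":"erinnerungen",
--     "aufgabe":     "aufgabe",
--     "aufgaben":    "aufgaben",
--     "wetter":      "wetter",
--     "wecker":      "wecker",
--     "lösche":      "lösche",
--     "leere":       "leere",
--     "füge":        "füge",
--     "hinzufügen":  "hinzufügen",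
--     "vorlesen":    "vorlesen",
--     "anzeigen":    "anzeigen",
-- }
--
-- _FUZZY_MAX_DIST = 2   # max. 2 Editoperationen
--
-- def _fuzzy_correct_word(word: str) -> str:
--     """
--     Ersetzt ein einzelnes Wort durch das ähnlichste kanonische Keyword
--     wenn Levenshtein-Distanz ≤ _FUZZY_MAX_DIST.
--     Gibt das Originalwort zurück wenn kein guter Match.
--     """
--     if len(word) < 5:
--         return word   # Kurze Wörter (fünf, vier, ...) NICHT anfassen → verhindert fünf→füge
--     best_canonical = word
--     best_dist = _FUZZY_MAX_DIST + 1
--     for canonical in _FUZZY_KEYWORDS: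
--         # Längencheck als schneller Vorfilter
--         if abs(len(word) - len(canonical)) > _FUZZY_MAX_DIST:
--             continue
--         d = _levenshtein(word, canonical)
--         if d < best_dist:
--             best_dist = d
--             best_canonical = canonical
--     return best_canonical if best_dist <= _FUZZY_MAX_DIST else word
-- ===== SOURCE B (Python) =====
-- _FUZZY_KEYWORDS = {
--     "notiz":       "notiz",
--     "notizen":     "notizen",
--     "timer":       "timer",
--     "kalender":    "kalender",
--     "termin":      "termin",
--     "erinnerung":  "erinnerung",
--     "erinnerungen":"erinnerungen",
--     "aufgabe":     "aufgabe",
--     "aufgaben":    "aufgaben",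
--     "wetter":      "wetter",
--     "wecker":      "wecker",
--     "lösche":      "lösche",
--     "leere":       "leere",
--     "füge":        "füge",
--     "hinzufügen":  "hinzufügen",
--     "vorlesen":    "vorlesen",
--     "anzeigen":    "anzeigen",
-- }
--
-- _FUZZY_MAX_DIST = 2
--
--
-- def _lev(a: str, b: str) -> int:
--     """Top-down recursive edit distance over prefix lengths, with memoization."""
--     cache = {}
--
--     def rec(i, j):
--         if i == 0:
--             return j
--         if j == 0:
--             return i
--         if (i, j) in cache:
--             return cache[(i, j)]
--         cost = 0 if a[i - 1] == b[j - 1] else 1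
--         v = min(rec(i - 1, j) + 1, rec(i, j - 1) + 1, rec(i - 1, j - 1) + cost)
--         cache[(i, j)] = v
--         return v
--
--     return rec(len(a), len(b))
--
--
-- def _fuzzy_correct_word(word: str) -> str:
--     if len(word) < 5:
--         return word
--     # distances to the plausible keywords (a length gap > 2 forces distance > 2)
--     dists = {k: _lev(word, k) for k in _FUZZY_KEYWORDS
--              if abs(len(word) - len(k)) <= _FUZZY_MAX_DIST}
--     # return the first keyword at the smallest achieved distance 0, 1 or 2
--     for t in (0, 1, 2):
--         for k, d in dists.items():
--             if d == t:
--                 return k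
--     return word
-- ===== Notes on version B (the rewrite author's own statement) =====
-- stated objective: alternative
-- what changed: The bottom-up DP-row Levenshtein is replaced by a top-down memoized recursion over prefix lengths, and the running-best/strict-improvement scan over the keywords is replaced by precomputing a distance table for the length-plausible keywords and returning the first keyword found at distance 0, then 1, then 2.
import Mathlib
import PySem

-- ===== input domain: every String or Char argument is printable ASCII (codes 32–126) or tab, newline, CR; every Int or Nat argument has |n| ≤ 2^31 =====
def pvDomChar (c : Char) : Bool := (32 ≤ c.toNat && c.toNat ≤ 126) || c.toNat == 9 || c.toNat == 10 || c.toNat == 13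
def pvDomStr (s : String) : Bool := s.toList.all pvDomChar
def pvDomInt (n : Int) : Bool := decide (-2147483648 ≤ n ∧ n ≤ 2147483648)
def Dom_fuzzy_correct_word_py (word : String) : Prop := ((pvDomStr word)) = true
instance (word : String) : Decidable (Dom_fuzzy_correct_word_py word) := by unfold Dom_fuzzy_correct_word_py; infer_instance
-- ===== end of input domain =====

-- B replaces A's bottom-up DP-row Levenshtein by a top-down recursion over prefix
-- lengths (memoized in Python; the cache is semantically transparent) and replaces the
-- running-best keyword scan by a first-keyword-at-distance-0-then-1-then-2 scan over a
-- precomputed distance table: an alternative decomposition of the same task.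


-- keys of _FUZZY_KEYWORDS in insertion order (the dict's values are never used)
def pvKeywords : List String :=
  ["notiz", "notizen", "timer", "kalender", "termin", "erinnerung", "erinnerungen",
   "aufgabe", "aufgaben", "wetter", "wecker", "lösche", "leere", "füge", "hinzufügen",
   "vorlesen", "anzeigen"]

-- ===== PORT A =====
-- _levenshtein: all the Python ints here (row entries, distances) are ≥ 0, so they are
-- carried as Nat; indices i, j of enumerate are ≥ 0, so ica.1.toNat is exact.
def pvLevA (a b : List Char) : Nat :=
  if a = b then 0
  else if a = [] then b.length
  else if b = [] then a.length
  else
    let lb := b.length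
    let prev := (PySem.List.enumerate a).foldl (fun prev ica =>
      (PySem.List.enumerate b).foldl (fun curr jcb =>
        PySem.List.pySetD curr (jcb.1 + 1)
          (min (PySem.List.pyGetD prev (jcb.1 + 1) 0 + 1)
            (min (PySem.List.pyGetD curr jcb.1 0 + 1)
              (PySem.List.pyGetD prev jcb.1 0 + (if ica.2 = jcb.2 then 0 else 1)))))
        (((ica.1.toNat) + 1) :: List.replicate lb 0))
      (List.range (lb + 1))
    PySem.List.pyGetD prev (lb : Int) 0

def fuzzy_correct_word_py (word : String) : String :=
  if PySem.Str.len word < 5 then word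
  else
    let st := pvKeywords.foldl (fun s canonical =>
      if 2 < (PySem.Str.len word - PySem.Str.len canonical).natAbs then s
      else
        let d := pvLevA word.toList canonical.toList
        if d < s.2 then (canonical, d) else s) (word, 3)
    if st.2 ≤ 2 then st.1 else word

-- ===== PORT B =====
-- _lev's inner rec(i, j) over prefix lengths, with the Python memo cache threaded
-- through explicitly (Python's closure-captured dict becomes a state argument).
def pvLevGo (a b : List Char) (i j : Nat) (cache : PySem.Dict (Nat × Nat) Nat) :
    Nat × PySem.Dict (Nat × Nat) Nat :=
  if i = 0 then (j, cache)
  else if j = 0 then (i, cache)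
  else
    match PySem.Dict.get? cache (i, j) with
    | some v => (v, cache)
    | none =>
      let cost := if a.getD (i - 1) ' ' = b.getD (j - 1) ' ' then 0 else 1
      let r1 := pvLevGo a b (i - 1) j cache
      let r2 := pvLevGo a b i (j - 1) r1.2
      let r3 := pvLevGo a b (i - 1) (j - 1) r2.2
      let v := min (r1.1 + 1) (min (r2.1 + 1) (r3.1 + cost))
      (v, PySem.Dict.insert r3.2 (i, j) v)
termination_by i + j
decreasing_by all_goals omega

-- _lev(a, b) = rec(len(a), len(b)) starting from an empty cache
def pvLev (a b : List Char) : Nat :=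
  (pvLevGo a b a.length b.length PySem.Dict.empty).1

def fuzzy_correct_word_py_alt (word : String) : String :=
  if PySem.Str.len word < 5 then word
  else
    let dists := (pvKeywords.filter
        (fun k => (PySem.Str.len word - PySem.Str.len k).natAbs ≤ 2)).map
      (fun k => (k, pvLev word.toList k.toList))
    -- for t in (0, 1, 2): for k, d in dists.items(): if d == t: return k
    match [0, 1, 2].findSome? (fun t => (dists.find? (fun p => p.2 == t)).map Prod.fst) with
    | some k => k
    | none => word

-- ===== PRECONDITION & SPEC =====
def Spec_fuzzy_correct_word_py (word : String) (out : String) : Prop := out = fuzzy_correct_word_py_alt word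
instance (word : String) (out : String) : Decidable (Spec_fuzzy_correct_word_py word out) := by unfold Spec_fuzzy_correct_word_py; infer_instance

-- ===== CLAIM (what is proved, stated in full; the proofs are below) =====
def Claim_equal_fuzzy_correct_word_py : Prop := ∀ (word : String), Dom_fuzzy_correct_word_py word → Spec_fuzzy_correct_word_py word (fuzzy_correct_word_py word)

-- ===== LEMMAS AND PROOFS =====

-- proof-side specification: the plain (unmemoized) prefix-length recursion
def pvLevRec (a b : List Char) (i j : Nat) : Nat :=
  if i = 0 then j
  else if j = 0 then i
  else
    let cost := if a.getD (i - 1) ' ' = b.getD (j - 1) ' ' then 0 else 1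
    min (pvLevRec a b (i - 1) j + 1)
      (min (pvLevRec a b i (j - 1) + 1) (pvLevRec a b (i - 1) (j - 1) + cost))
termination_by i + j
decreasing_by all_goals omega

-- rec(n, n) on identical strings is 0
lemma pvLevRec_self (a : List Char) : ∀ n, pvLevRec a a n n = 0 := by
  intro n
  induction n with
  | zero => simp [pvLevRec]
  | succ n ih =>
      rw [pvLevRec]
      simp [ih]

-- rec(0, j) = j and rec(i, 0) = i
lemma pvLevRec_zero_left (a b : List Char) (j : Nat) : pvLevRec a b 0 j = j := by
  rw [pvLevRec]; simp

lemma pvLevRec_zero_right (a b : List Char) (i : Nat) : pvLevRec a b i 0 = i := by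
  rw [pvLevRec]; split <;> simp_all

-- the memoized recursion computes the plain recursion (the cache is an invariant)
lemma pvLevGo_correct (a b : List Char) :
    ∀ (i j : Nat) (cache : PySem.Dict (Nat × Nat) Nat),
      (∀ p v, PySem.Dict.get? cache p = some v → v = pvLevRec a b p.1 p.2) →
      (pvLevGo a b i j cache).1 = pvLevRec a b i j ∧
      (∀ p v, PySem.Dict.get? (pvLevGo a b i j cache).2 p = some v → v = pvLevRec a b p.1 p.2) := by
  intro i j cache
  induction i, j, cache using pvLevGo.induct a b with
  | case1 j cache =>
      intro hc
      rw [pvLevGo, if_pos rfl]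
      exact ⟨(pvLevRec_zero_left a b j).symm, hc⟩
  | case2 i cache hi =>
      intro hc
      rw [pvLevGo, if_neg hi, if_pos rfl]
      exact ⟨(pvLevRec_zero_right a b i).symm, hc⟩
  | case3 i j cache hi hj v hv =>
      intro hc
      rw [pvLevGo, if_neg hi, if_neg hj, hv]
      exact ⟨hc (i, j) v hv, hc⟩
  | case4 i j cache hi hj hnone r1 r2 ih1 ih2 ih2' ih3 =>
      intro hc
      have h1 := ih1 hc
      have h2 := ih2' h1.2
      have h3 := ih3 h2.2
      rw [pvLevGo, if_neg hi, if_neg hj, hnone]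
      dsimp only
      constructor
      · rw [h1.1, h2.1, h3.1]
        conv_rhs => rw [pvLevRec]
        rw [if_neg hi, if_neg hj]
      · intro p w hw
        rw [PySem.Dict.get?_insert] at hw
        split at hw
        · rename_i hp
          subst hp
          have hw' : w = min ((pvLevGo a b (i - 1) j cache).1 + 1)
              (min ((pvLevGo a b i (j - 1) (pvLevGo a b (i - 1) j cache).2).1 + 1)
                ((pvLevGo a b (i - 1) (j - 1)
                  (pvLevGo a b i (j - 1) (pvLevGo a b (i - 1) j cache).2).2).1 +
                  (if a.getD (i - 1) ' ' = b.getD (j - 1) ' ' then 0 else 1))) := by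
            injection hw
            omega
          rw [hw', h1.1, h2.1, h3.1]
          conv_rhs => rw [pvLevRec]
          rw [if_neg hi, if_neg hj]
        · exact h3.2 p w hw

lemma pvLev_eq (a b : List Char) : pvLev a b = pvLevRec a b a.length b.length := by
  have h := pvLevGo_correct a b a.length b.length PySem.Dict.empty
    (by intro p v hv; simp [PySem.Dict.get?_empty] at hv)
  exact h.1

-- invariant of A's inner row loop: it extends the prefix of row i+1 already in curr
lemma pvInner (a b : List Char) (i : Nat) (prev : List Nat) (ca : Char)
    (hca : ca = a.getD i ' ')
    (hp : ∀ t, t ≤ b.length → prev.getD t 0 = pvLevRec a b i t) :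
    ∀ (bs : List Char) (s : Nat) (curr : List Nat),
      b.drop s = bs → curr.length = b.length + 1 →
      (∀ t, t ≤ s → curr.getD t 0 = pvLevRec a b (i + 1) t) →
      ((PySem.List.enumerate bs (s : Int)).foldl
          (fun curr jcb => PySem.List.pySetD curr (jcb.1 + 1)
            (min (PySem.List.pyGetD prev (jcb.1 + 1) 0 + 1)
              (min (PySem.List.pyGetD curr jcb.1 0 + 1)
                (PySem.List.pyGetD prev jcb.1 0 + (if ca = jcb.2 then 0 else 1))))) curr).length
          = b.length + 1
      ∧ ∀ t, t ≤ b.length →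
        ((PySem.List.enumerate bs (s : Int)).foldl
          (fun curr jcb => PySem.List.pySetD curr (jcb.1 + 1)
            (min (PySem.List.pyGetD prev (jcb.1 + 1) 0 + 1)
              (min (PySem.List.pyGetD curr jcb.1 0 + 1)
                (PySem.List.pyGetD prev jcb.1 0 + (if ca = jcb.2 then 0 else 1))))) curr).getD t 0
          = pvLevRec a b (i + 1) t := by
  intro bs
  induction bs with
  | nil =>
      intro s curr hdrop hlen hinv
      have hs : b.length ≤ s := by
        by_contra h
        have := congrArg List.length hdrop
        simp [List.length_drop] at this
        omega
      refine ⟨by simpa [PySem.List.enumerate] using hlen, ?_⟩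
      intro t ht
      simpa [PySem.List.enumerate] using hinv t (by omega)
  | cons cb bs' ih =>
      intro s curr hdrop hlen hinv
      have hslt : s < b.length := by
        by_contra h
        rw [List.drop_eq_nil_of_le (by omega)] at hdrop
        exact (List.cons_ne_nil _ _) hdrop.symm
      have hd2 : b.drop s = b[s] :: b.drop (s + 1) := List.drop_eq_getElem_cons hslt
      rw [hd2] at hdrop
      obtain ⟨hcb, hbs'⟩ : b[s] = cb ∧ b.drop (s + 1) = bs' := by
        exact ⟨by injection hdrop, by injection hdrop⟩
      rw [PySem.List.enumerate_cons, List.foldl_cons]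
      have hcast : (s : Int) + 1 = ((s + 1 : Nat) : Int) := by push_cast; ring
      -- the written entry
      have hv : PySem.List.pySetD curr ((s : Int) + 1)
            (min (PySem.List.pyGetD prev ((s : Int) + 1) 0 + 1)
              (min (PySem.List.pyGetD curr (s : Int) 0 + 1)
                (PySem.List.pyGetD prev (s : Int) 0 + (if ca = cb then 0 else 1))))
          = curr.set (s + 1) (pvLevRec a b (i + 1) (s + 1)) := by
        rw [hcast]
        rw [PySem.List.pySetD_natCast]
        congr 1
        rw [PySem.List.pyGetD_natCast, PySem.List.pyGetD_natCast, PySem.List.pyGetD_natCast]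
        rw [hp (s + 1) (by omega), hp s (by omega), hinv s (by omega)]
        conv_rhs => rw [pvLevRec]
        simp only [Nat.add_sub_cancel, if_neg (Nat.succ_ne_zero i), if_neg (Nat.succ_ne_zero s)]
        congr 2
        rw [hca, ← hcb, List.getD_eq_getElem _ _ hslt]
      rw [hv]
      exact ih (s + 1) _ hbs' (by simpa using hlen)
        (by
          intro t ht
          rcases Nat.lt_or_ge t (s + 1) with h | h
          · rw [List.getD_eq_getElem?_getD, List.getElem?_set_ne (by omega),
              ← List.getD_eq_getElem?_getD]
            exact hinv t (by omega)
          · have ht1 : t = s + 1 := by omega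
            subst ht1
            rw [List.getD_eq_getElem?_getD, List.getElem?_set_self' ,
              List.getElem?_eq_getElem (by omega)]
            simp)

-- invariant of A's outer loop: prev is row i of the recursion's table
lemma pvOuter (a b : List Char) :
    ∀ (as : List Char) (i : Nat) (prev : List Nat),
      a.drop i = as → i ≤ a.length → prev.length = b.length + 1 →
      (∀ t, t ≤ b.length → prev.getD t 0 = pvLevRec a b i t) →
      ∀ t, t ≤ b.length →
        ((PySem.List.enumerate as (i : Int)).foldl (fun prev ica =>
          (PySem.List.enumerate b).foldl
            (fun curr jcb => PySem.List.pySetD curr (jcb.1 + 1)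
              (min (PySem.List.pyGetD prev (jcb.1 + 1) 0 + 1)
                (min (PySem.List.pyGetD curr jcb.1 0 + 1)
                  (PySem.List.pyGetD prev jcb.1 0 + (if ica.2 = jcb.2 then 0 else 1)))))
            ((ica.1.toNat + 1) :: List.replicate b.length 0)) prev).getD t 0
          = pvLevRec a b a.length t := by
  intro as
  induction as with
  | nil =>
      intro i prev hdrop hile hlen hp t ht
      have hi : a.length ≤ i := by
        by_contra h
        have := congrArg List.length hdrop
        simp [List.length_drop] at this
        omega
      have hieq : i = a.length := by omega
      subst hieq
      simpa [PySem.List.enumerate] using hp t ht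
  | cons ca as' ihs =>
      intro i prev hdrop hile hlen hp t ht
      have hilt : i < a.length := by
        by_contra h
        rw [List.drop_eq_nil_of_le (by omega)] at hdrop
        exact (List.cons_ne_nil _ _) hdrop.symm
      have hd2 : a.drop i = a[i] :: a.drop (i + 1) := List.drop_eq_getElem_cons hilt
      rw [hd2] at hdrop
      obtain ⟨hcai, has'⟩ : a[i] = ca ∧ a.drop (i + 1) = as' := by
        exact ⟨by injection hdrop, by injection hdrop⟩
      rw [PySem.List.enumerate_cons, List.foldl_cons]
      have hinner := pvInner a b i prev ca
        (by rw [← hcai, List.getD_eq_getElem _ _ hilt])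
        hp b 0 (((i : Int).toNat + 1) :: List.replicate b.length 0) (by simp) (by simp)
        (by
          intro t' ht'
          have : t' = 0 := by omega
          subst this
          simp [pvLevRec_zero_right])
      have hcast : (i : Int) + 1 = ((i + 1 : Nat) : Int) := by push_cast; ring
      rw [hcast]
      exact ihs (i + 1) _ has' (by omega) hinner.1 hinner.2 t ht

-- the DP of A computes the recursion of B
lemma pvLevA_eq (a b : List Char) : pvLevA a b = pvLevRec a b a.length b.length := by
  rw [pvLevA]
  by_cases hab : a = b
  · subst hab
    simp [pvLevRec_self]
  · rw [if_neg hab]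
    by_cases ha : a = []
    · subst ha
      simp [pvLevRec_zero_left]
    · rw [if_neg ha]
      by_cases hb : b = []
      · subst hb
        simp [pvLevRec_zero_right]
      · rw [if_neg hb]
        have h := pvOuter a b a 0 (List.range (b.length + 1)) (by simp) (by omega) (by simp)
          (by
            intro t ht
            rw [List.getD_eq_getElem?_getD, List.getElem?_range (by omega)]
            simp [pvLevRec_zero_left])
          b.length (le_refl _)
        simpa using h

-- findSome? only depends on the function's values on members
lemma pvFindSome_congr {α β : Type} (l : List α) (f g : α → Option β)
    (h : ∀ x ∈ l, f x = g x) : l.findSome? f = l.findSome? g := by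
  induction l with
  | nil => rfl
  | cons x xs ih =>
      rw [List.findSome?_cons, List.findSome?_cons, h x (by simp)]
      cases g x with
      | none => exact ih (fun y hy => h y (by simp [hy]))
      | some b => rfl

-- generic: A's running-best fold over the keywords equals the distance-level scan
lemma pvFold_scan (d : String → Nat) (e : String → Nat) :
    ∀ (ks : List String) (bc : String) (bd : Nat),
      ks.foldl (fun s k => if 2 < e k then s else if d k < s.2 then (k, d k) else s) (bc, bd)
        = match (List.range bd).findSome?
            (fun t => (ks.filter (fun k => e k ≤ 2)).find? (fun k => d k == t)) with
          | none => (bc, bd)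
          | some k => (k, d k) := by
  intro ks
  induction ks with
  | nil =>
      intro bc bd
      have h : (List.range bd).findSome?
          (fun t => (List.filter (fun k => e k ≤ 2) []).find? (fun k => d k == t)) = none := by
        simp
      simp only [List.foldl_nil, h]
  | cons k ks ih =>
      intro bc bd
      simp only [List.foldl_cons]
      by_cases hk : 2 < e k
      · rw [if_pos hk, ih bc bd]
        have hfil : List.filter (fun k => e k ≤ 2) (k :: ks)
            = List.filter (fun k => e k ≤ 2) ks := by
          simp [List.filter_cons]; omega
        rw [hfil]
      · rw [if_neg hk]
        have hke : (e k ≤ 2) := by omega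
        have hfil : List.filter (fun k => e k ≤ 2) (k :: ks)
            = k :: List.filter (fun k => e k ≤ 2) ks := by
          simp [hke]
        rw [hfil]
        by_cases hd : d k < bd
        · rw [if_pos hd, ih k (d k)]
          have hsplit : List.range bd
              = List.range (d k) ++ List.map (fun x => d k + x) (List.range (bd - d k)) := by
            rw [← List.range_add]; congr 1; omega
          rcases hcase : (List.range (d k)).findSome?
              (fun t => (List.filter (fun k => e k ≤ 2) ks).find? (fun k' => d k' == t))
              with _ | k'
          · -- nothing in ks is strictly closer: the scan first succeeds at t = d k, on k
            have hpre : (List.range (d k)).findSome?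
                (fun t => (k :: List.filter (fun k => e k ≤ 2) ks).find? (fun k' => d k' == t))
                = none := by
              rw [List.findSome?_eq_none_iff] at hcase ⊢
              intro t ht
              have htlt : t < d k := List.mem_range.mp ht
              rw [List.find?_cons_of_neg (by simp; omega)]
              exact hcase t ht
            have hsuf : bd - d k = (bd - d k - 1) + 1 := by omega
            rw [hsplit, List.findSome?_append, hpre, Option.none_or, hsuf,
              List.range_succ_eq_map, List.map_cons, List.findSome?_cons]
            have hhit : (k :: List.filter (fun k => e k ≤ 2) ks).find?
                (fun k' => d k' == (d k + 0)) = some k := by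
              rw [List.find?_cons_of_pos (by simp)]
            rw [hhit]
          · -- something in ks is strictly closer: k never matches a t < d k
            have hpre : (List.range bd).findSome?
                (fun t => (k :: List.filter (fun k => e k ≤ 2) ks).find? (fun k' => d k' == t))
                = ((List.range (d k)).findSome?
                  (fun t => (List.filter (fun k => e k ≤ 2) ks).find? (fun k' => d k' == t))).or
                  ((List.map (fun x => d k + x) (List.range (bd - d k))).findSome?
                    (fun t => (k :: List.filter (fun k => e k ≤ 2) ks).find? (fun k' => d k' == t))) := by
              rw [hsplit, List.findSome?_append]
              congr 1
              apply pvFindSome_congr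
              intro t ht
              have htlt : t < d k := List.mem_range.mp ht
              rw [List.find?_cons_of_neg (by simp; omega)]
            rw [hpre, hcase, Option.some_or]
        · rw [if_neg hd, ih bc bd]
          have hcongr : (List.range bd).findSome?
              (fun t => (k :: List.filter (fun k => e k ≤ 2) ks).find? (fun k' => d k' == t))
              = (List.range bd).findSome?
                (fun t => (List.filter (fun k => e k ≤ 2) ks).find? (fun k' => d k' == t)) := by
            apply pvFindSome_congr
            intro t ht
            have htlt : t < bd := List.mem_range.mp ht
            rw [List.find?_cons_of_neg (by simp; omega)]
          rw [hcongr]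

-- find? over the (keyword, distance) pairs projects to find? over the keywords
lemma pvFind_map (f : String → Nat) (t : Nat) :
    ∀ (l : List String),
      ((l.map (fun k => (k, f k))).find? (fun p => p.2 == t)).map Prod.fst
        = l.find? (fun k => f k == t) := by
  intro l
  induction l with
  | nil => rfl
  | cons k ks ih =>
      by_cases h : f k == t
      · simp [h]
      · simp only [List.map_cons, List.find?_cons]
        simp only [h]
        exact ih

-- ===== VERDICT (by name: the statement is the Claim_ definition above) =====
theorem fuzzy_correct_word_py_spec : Claim_equal_fuzzy_correct_word_py := by
  intro word _
  unfold Spec_fuzzy_correct_word_py fuzzy_correct_word_py fuzzy_correct_word_py_alt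
  by_cases hlen : PySem.Str.len word < 5
  · rw [if_pos hlen, if_pos hlen]
  · rw [if_neg hlen, if_neg hlen]
    have hfold := pvFold_scan (fun k => pvLevA word.toList k.toList)
      (fun k => (PySem.Str.len word - PySem.Str.len k).natAbs) pvKeywords word 3
    simp only [] at hfold ⊢
    rw [hfold]
    simp only [pvFind_map (fun k => pvLev word.toList k.toList)]
    simp only [pvLev_eq, ← pvLevA_eq]
    have hr3 : List.range 3 = [0, 1, 2] := rfl
    rw [hr3]
    rcases hc : [0, 1, 2].findSome?
        (fun t => (pvKeywords.filter
          (fun k => (PySem.Str.len word - PySem.Str.len k).natAbs ≤ 2)).find?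
            (fun k => pvLevA word.toList k.toList == t)) with _ | k
    · rw [hc]
      simp
    · rw [hc]
      obtain ⟨t, htmem, hft⟩ := List.exists_of_findSome?_eq_some hc
      have hpk := List.find?_some hft
      have hdk : pvLevA word.toList k.toList = t := by
        simpa using hpk
      have ht2 : t ≤ 2 := by
        simp at htmem
        omega
      simp [hdk, ht2]
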